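-- pv_equiv track=rewrite | github.com/EvanLee2004/-agent- | configuration/file_configuration_repository.py | _upsert_env_lines
-- ===== SOURCE A (Python) =====
-- def _build_env_line(env_name: str, env_value: str) -> str:
--     """构造 `.env` 文件中的单行环境变量内容。"""
--     return f"{env_name}={env_value}"
--
-- def _upsert_env_lines(
--     existing_lines: list[str],
--     env_name: str,
--     env_value: str,
-- ) -> list[str]:
--     """在 `.env` 文本中更新或追加指定环境变量。
--
--     这里显式按变量名做 upsert，而不是继续保留“只会写 LLM_API_KEY”的特殊逻辑，
--     是因为多模型配置完成后，不同 provider 往往对应不同密钥环境变量。如果仓储层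
--     仍然只认识一个固定变量名，配置层就不得不重新发明一套环境变量写入逻辑。
--     """
--     normalized_lines = []
--     has_target_env = False
--     expected_prefix = f"{env_name}="
--     for line in existing_lines:
--         if line.startswith(expected_prefix):
--             normalized_lines.append(_build_env_line(env_name, env_value))
--             has_target_env = True
--             continue
--         normalized_lines.append(line)
--     if not has_target_env:
--         normalized_lines.append(_build_env_line(env_name, env_value))
--     return normalized_lines
-- ===== SOURCE B (Python) =====
-- def _upsert_env_lines(
--     existing_lines: list[str],
--     env_name: str,
--     env_value: str,
-- ) -> list[str]:
--     new_line = f"{env_name}={env_value}"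
--     prefix = f"{env_name}="
--     found = any(line.startswith(prefix) for line in existing_lines)
--     if found:
--         return [new_line if line.startswith(prefix) else line for line in existing_lines]
--     return existing_lines + [new_line]
-- ===== Notes on version B (the rewrite author's own statement) =====
-- stated objective: idiomatic
-- what changed: Replaces the single flag-carrying accumulator loop by a detect-then-transform decomposition: one any() scan to check presence, then either a replacing list comprehension or a plain append.
import Mathlib
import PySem

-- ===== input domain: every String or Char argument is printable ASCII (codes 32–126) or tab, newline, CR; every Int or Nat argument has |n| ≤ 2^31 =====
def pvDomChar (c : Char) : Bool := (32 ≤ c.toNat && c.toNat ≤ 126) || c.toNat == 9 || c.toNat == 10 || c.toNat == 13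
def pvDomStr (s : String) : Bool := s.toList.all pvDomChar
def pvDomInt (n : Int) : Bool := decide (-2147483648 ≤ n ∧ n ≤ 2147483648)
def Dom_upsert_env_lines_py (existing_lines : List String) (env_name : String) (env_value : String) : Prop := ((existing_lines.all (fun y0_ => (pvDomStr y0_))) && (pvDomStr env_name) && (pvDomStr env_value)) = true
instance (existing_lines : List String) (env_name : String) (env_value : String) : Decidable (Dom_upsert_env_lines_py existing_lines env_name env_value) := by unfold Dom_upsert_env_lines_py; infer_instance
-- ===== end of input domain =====

-- ===== PORT A =====
-- B: the flag-carrying accumulator loop is replaced by a detect-then-transform decomposition (any-scan, then comprehension or append); same values.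
def build_env_line (env_name : String) (env_value : String) : String :=
  env_name ++ "=" ++ env_value

def upsert_env_lines_py (existing_lines : List String) (env_name : String) (env_value : String) : List String :=
  let expected_prefix := env_name ++ "="
  let st := existing_lines.foldl
    (fun (acc : List String × Bool) line =>
      if PySem.Str.startswith line expected_prefix then
        (acc.1 ++ [build_env_line env_name env_value], true)
      else
        (acc.1 ++ [line], acc.2))
    ([], false)
  if st.2 then st.1 else st.1 ++ [build_env_line env_name env_value]

-- ===== PORT B =====
def upsert_env_lines_py_alt (existing_lines : List String) (env_name : String) (env_value : String) : List String :=
  let new_line := env_name ++ "=" ++ env_value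
  let pref := env_name ++ "="
  if existing_lines.any (fun line => PySem.Str.startswith line pref) then
    existing_lines.map (fun line => if PySem.Str.startswith line pref then new_line else line)
  else
    existing_lines ++ [new_line]

-- ===== PRECONDITION & SPEC =====
def Spec_upsert_env_lines_py (existing_lines : List String) (env_name : String) (env_value : String) (out : List String) : Prop := out = upsert_env_lines_py_alt existing_lines env_name env_value
instance (existing_lines : List String) (env_name : String) (env_value : String) (out : List String) : Decidable (Spec_upsert_env_lines_py existing_lines env_name env_value out) := by unfold Spec_upsert_env_lines_py; infer_instance

-- ===== CLAIM (what is proved, stated in full; the proofs are below) =====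
def Claim_equal_upsert_env_lines_py : Prop := ∀ (existing_lines : List String) (env_name : String) (env_value : String), Dom_upsert_env_lines_py existing_lines env_name env_value → Spec_upsert_env_lines_py existing_lines env_name env_value (upsert_env_lines_py existing_lines env_name env_value)

-- ===== LEMMAS AND PROOFS =====

-- ===== VERDICT (by name: the statement is the Claim_ definition above) =====
-- The loop's invariant: the accumulator collects the replaced lines, the flag is the running any.
theorem upsert_loop_inv (p : String → Bool) (rep : String) (ls : List String) (acc : List String) (b : Bool) :
    ls.foldl
      (fun (acc : List String × Bool) line =>
        if p line then (acc.1 ++ [rep], true)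
        else (acc.1 ++ [line], acc.2)) (acc, b)
    = (acc ++ ls.map (fun line => if p line then rep else line), b || ls.any p) := by
  induction ls generalizing acc b with
  | nil => simp
  | cons x xs ih =>
    by_cases h : p x = true
    · simp [List.foldl_cons, h, ih]
    · simp only [Bool.not_eq_true] at h
      simp [List.foldl_cons, h, ih]

theorem map_no_match (p : String → Bool) (rep : String) (ls : List String)
    (h : ls.any p = false) :
    ls.map (fun line => if p line then rep else line) = ls := by
  induction ls with
  | nil => rfl
  | cons x xs ih =>
    simp only [List.any_cons, Bool.or_eq_false_iff] at h
    simp [h.1, ih h.2]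

theorem upsert_env_lines_py_spec : Claim_equal_upsert_env_lines_py := by
  intro ls n v _
  unfold Spec_upsert_env_lines_py upsert_env_lines_py upsert_env_lines_py_alt build_env_line
  simp only [upsert_loop_inv, Bool.false_or]
  by_cases h : ls.any (fun line => PySem.Str.startswith line (n ++ "=")) = true
  · rw [h]; simp
  · simp only [Bool.not_eq_true] at h
    rw [h, map_no_match _ _ _ h]; simp
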